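-- pv_equiv track=rewrite | github.com/travisp/alfred-aerospace | workflow/scripts/lib/alfred_metadata.py | _find_comment_start
-- ===== SOURCE A (Python) =====
-- from typing import Any, Dict, Optional
--
-- def _find_comment_start(line: str) -> Optional[int]:
--     quote: Optional[str] = None
--     escaped = False
--
--     for idx, char in enumerate(line):
--         if quote == '"':
--             if escaped:
--                 escaped = False
--                 continue
--             if char == "\\":
--                 escaped = True
--                 continue
--             if char == quote:
--                 quote = None
--             continue
--
--         if quote == "'":
--             if char == quote:
--                 quote = None
--             continue
--
--         if char == "#":
--             return idx
--         if char in {"'", '"'}: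
--             quote = char
--
--     return None
-- ===== SOURCE B (Python) =====
-- from typing import Optional
--
-- def _find_comment_start(line: str) -> Optional[int]:
--     n = len(line)
--     i = 0
--     while i < n:
--         c = line[i]
--         if c == "#":
--             return i
--         elif c == '"':
--             # skip a double-quoted region; '\' escapes the next character
--             i += 1
--             while i < n:
--                 d = line[i]
--                 if d == "\\":
--                     i += 2
--                 elif d == '"':
--                     i += 1
--                     break
--                 else:
--                     i += 1
--         elif c == "'":
--             # skip a single-quoted region; no escapes
--             i += 1
--             while i < n and line[i] != "'":
--                 i += 1
--             i += 1
--         else: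
--             i += 1
--     return None
-- ===== Notes on version B (the rewrite author's own statement) =====
-- stated objective: alternative
-- what changed: Replaces A's single flat scan with persistent quote/escaped state flags by an index-based outer loop with two dedicated inner skip loops (one for double quotes handling backslash escapes, one for single quotes with none), so no state flags survive across iterations.
import Mathlib
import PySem

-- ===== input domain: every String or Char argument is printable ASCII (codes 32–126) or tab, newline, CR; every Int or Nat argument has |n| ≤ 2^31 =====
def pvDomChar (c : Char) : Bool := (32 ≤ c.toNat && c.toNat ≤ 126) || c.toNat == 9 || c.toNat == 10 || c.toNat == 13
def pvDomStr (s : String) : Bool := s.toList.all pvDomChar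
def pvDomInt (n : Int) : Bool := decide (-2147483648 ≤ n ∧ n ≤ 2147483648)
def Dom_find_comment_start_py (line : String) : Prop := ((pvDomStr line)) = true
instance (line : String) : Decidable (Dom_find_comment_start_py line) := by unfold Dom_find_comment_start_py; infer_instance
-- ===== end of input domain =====

-- B replaces A's flat scan with persistent quote/escape flags by nested skip loops per quoted region; alternative decomposition, same cost.

-- ===== PORT A =====
-- A: one pass with state (quote : Option Char, escaped : Bool), index counted along.
def findCommentA : List Char → Option Char → Bool → Nat → Option Int
  | [], _, _, _ => none
  | c :: rest, quote, escaped, idx =>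
    if quote = some '"' then
      if escaped then findCommentA rest quote false (idx + 1)
      else if c = '\\' then findCommentA rest quote true (idx + 1)
      else if c = '"' then findCommentA rest none false (idx + 1)
      else findCommentA rest quote false (idx + 1)
    else if quote = some '\'' then
      if c = '\'' then findCommentA rest none false (idx + 1)
      else findCommentA rest quote false (idx + 1)
    else if c = '#' then some (Int.ofNat idx)
    else if c = '\'' ∨ c = '"' then findCommentA rest (some c) false (idx + 1)
    else findCommentA rest none false (idx + 1)

def find_comment_start_py (line : String) : Option Int :=
  findCommentA line.toList none false 0

-- ===== PORT B =====
-- B: inner loop skipping a double-quoted region ('\' escapes the next char);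
-- returns the rest of the line after the closing '"' with its index, or none if unterminated.
def skipDouble : List Char → Nat → Option (List Char × Nat)
  | [], _ => none
  | d :: rest, i =>
    if d = '\\' then
      match rest with
      | [] => none
      | _ :: r => skipDouble r (i + 2)
    else if d = '"' then some (rest, i + 1)
    else skipDouble rest (i + 1)

-- B: inner loop skipping a single-quoted region, no escapes.
def skipSingle : List Char → Nat → Option (List Char × Nat)
  | [], _ => none
  | d :: rest, i =>
    if d = '\'' then some (rest, i + 1)
    else skipSingle rest (i + 1)


theorem skipDouble_nil (i : Nat) : skipDouble [] i = none := by
  rw [skipDouble.eq_def]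

theorem skipDouble_consEq (d : Char) (rest : List Char) (i : Nat) :
    skipDouble (d :: rest) i =
      (if d = '\\' then
        match rest with
        | [] => none
        | _ :: r => skipDouble r (i + 2)
      else if d = '"' then some (rest, i + 1)
      else skipDouble rest (i + 1)) := by
  rw [skipDouble.eq_def]

theorem skipSingle_nil (i : Nat) : skipSingle [] i = none := by
  rw [skipSingle.eq_def]

theorem skipSingle_consEq (d : Char) (rest : List Char) (i : Nat) :
    skipSingle (d :: rest) i =
      (if d = '\'' then some (rest, i + 1)
      else skipSingle rest (i + 1)) := by
  rw [skipSingle.eq_def]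

theorem skipDouble_length_aux (n : Nat) : ∀ (cs : List Char), cs.length ≤ n →
    ∀ {i j : Nat} {r : List Char}, skipDouble cs i = some (r, j) → r.length ≤ cs.length := by
  induction n with
  | zero =>
    intro cs h i j r hsk
    have : cs = [] := by cases cs <;> simp_all
    subst this; simp [skipDouble_nil] at hsk
  | succ n ih =>
    intro cs h i j r hsk
    cases cs with
    | nil => simp [skipDouble_nil] at hsk
    | cons d rest =>
      rw [skipDouble_consEq] at hsk
      split_ifs at hsk with h1 h2
      · cases rest with
        | nil => simp at hsk
        | cons x rr =>
          have := ih rr (by simp at h; omega) hsk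
          simp at *; omega
      · simp at hsk; obtain ⟨h3, _⟩ := hsk; subst h3; simp
      · have := ih rest (by simp at h; omega) hsk
        simp at *; omega

theorem skipDouble_length {cs r : List Char} {i j : Nat}
    (h : skipDouble cs i = some (r, j)) : r.length ≤ cs.length :=
  skipDouble_length_aux cs.length cs le_rfl h

theorem skipSingle_length_aux (n : Nat) : ∀ (cs : List Char), cs.length ≤ n →
    ∀ {i j : Nat} {r : List Char}, skipSingle cs i = some (r, j) → r.length ≤ cs.length := by
  induction n with
  | zero =>
    intro cs h i j r hsk
    have : cs = [] := by cases cs <;> simp_all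
    subst this; simp [skipSingle_nil] at hsk
  | succ n ih =>
    intro cs h i j r hsk
    cases cs with
    | nil => simp [skipSingle_nil] at hsk
    | cons d rest =>
      rw [skipSingle_consEq] at hsk
      split_ifs at hsk with h1
      · simp at hsk; obtain ⟨h3, _⟩ := hsk; subst h3; simp
      · have := ih rest (by simp at h; omega) hsk
        simp at *; omega

theorem skipSingle_length {cs r : List Char} {i j : Nat}
    (h : skipSingle cs i = some (r, j)) : r.length ≤ cs.length :=
  skipSingle_length_aux cs.length cs le_rfl h

-- B: outer loop — '#' found, or enter a skip loop, or step one char.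
def findCommentB : List Char → Nat → Option Int
  | [], _ => none
  | c :: rest, i =>
    if c = '#' then some (Int.ofNat i)
    else if c = '"' then
      match h : skipDouble rest (i + 1) with
      | none => none
      | some (r, j) => findCommentB r j
    else if c = '\'' then
      match h : skipSingle rest (i + 1) with
      | none => none
      | some (r, j) => findCommentB r j
    else findCommentB rest (i + 1)
termination_by cs _ => cs.length
decreasing_by
  · have := skipDouble_length h; simp; omega
  · have := skipSingle_length h; simp; omega
  · simp

def find_comment_start_py_alt (line : String) : Option Int :=
  findCommentB line.toList 0

-- ===== PRECONDITION & SPEC =====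
def Spec_find_comment_start_py (line : String) (out : Option Int) : Prop := out = find_comment_start_py_alt line
instance (line : String) (out : Option Int) : Decidable (Spec_find_comment_start_py line out) := by unfold Spec_find_comment_start_py; infer_instance

-- ===== CLAIM (what is proved, stated in full; the proofs are below) =====
def Claim_equal_find_comment_start_py : Prop := ∀ (line : String), Dom_find_comment_start_py line → Spec_find_comment_start_py line (find_comment_start_py line)

-- ===== LEMMAS AND PROOFS =====

-- continuation of B after entering a quoted region, as a function of the skip result
def dcont (cs : List Char) (i : Nat) : Option Int :=
  match skipDouble cs i with
  | none => none
  | some (r, j) => findCommentB r j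

def scont (cs : List Char) (i : Nat) : Option Int :=
  match skipSingle cs i with
  | none => none
  | some (r, j) => findCommentB r j

theorem dcont_nil (i : Nat) : dcont [] i = none := by
  simp [dcont, skipDouble_nil]

theorem dcont_cons (d : Char) (cs : List Char) (i : Nat) :
    dcont (d :: cs) i =
      if d = '\\' then (match cs with | [] => none | _ :: r => dcont r (i + 2))
      else if d = '"' then findCommentB cs (i + 1)
      else dcont cs (i + 1) := by
  rw [dcont, skipDouble_consEq]
  split_ifs with h1 h2
  · cases cs with
    | nil => rfl
    | cons x r => rfl
  · rfl
  · rfl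

theorem scont_nil (i : Nat) : scont [] i = none := by
  simp [scont, skipSingle_nil]

theorem scont_cons (d : Char) (cs : List Char) (i : Nat) :
    scont (d :: cs) i =
      if d = '\'' then findCommentB cs (i + 1)
      else scont cs (i + 1) := by
  rw [scont, skipSingle_consEq]
  split_ifs with h1
  · rfl
  · rfl

theorem findCommentB_nil (i : Nat) : findCommentB [] i = none := by
  rw [findCommentB]

theorem findCommentB_dquote (rest : List Char) (i : Nat) :
    findCommentB ('"' :: rest) i = dcont rest (i + 1) := by
  rw [findCommentB, dcont]
  simp
  cases skipDouble rest (i + 1) with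
  | none => rfl
  | some p => rfl

theorem findCommentB_squote (rest : List Char) (i : Nat) :
    findCommentB ('\'' :: rest) i = scont rest (i + 1) := by
  rw [findCommentB, scont]
  simp
  cases skipSingle rest (i + 1) with
  | none => rfl
  | some p => rfl

theorem findComment_main (n : Nat) : ∀ (cs : List Char), cs.length ≤ n → ∀ i : Nat,
    (findCommentA cs none false i = findCommentB cs i) ∧
    (findCommentA cs (some '"') false i = dcont cs i) ∧
    (findCommentA cs (some '"') true i =
      (match cs with | [] => none | _ :: r => dcont r (i + 1))) ∧
    (findCommentA cs (some '\'') false i = scont cs i) := by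
  induction n with
  | zero =>
    intro cs hlen i
    have : cs = [] := by cases cs <;> simp_all
    subst this
    refine ⟨?_, ?_, ?_, ?_⟩ <;>
      simp [findCommentA, findCommentB_nil, dcont_nil, scont_nil]
  | succ n ih =>
    intro cs hlen i
    cases cs with
    | nil =>
      refine ⟨?_, ?_, ?_, ?_⟩ <;>
        simp [findCommentA, findCommentB_nil, dcont_nil, scont_nil]
    | cons c rest =>
      have hr : rest.length ≤ n := by simp at hlen; omega
      refine ⟨?_, ?_, ?_, ?_⟩
      · -- outside quotes
        by_cases hh : c = '#'
        · subst hh; rw [findCommentA, findCommentB]; simp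
        · by_cases hd : c = '"'
          · subst hd
            rw [findCommentA]
            simp [findCommentB_dquote]
            exact (ih rest hr (i + 1)).2.1
          · by_cases hs : c = '\''
            · subst hs
              rw [findCommentA]
              simp [findCommentB_squote]
              exact (ih rest hr (i + 1)).2.2.2
            · rw [findCommentA, findCommentB]
              simp [hh, hd, hs]
              exact (ih rest hr (i + 1)).1
      · -- inside a double quote, not escaped
        by_cases hb : c = '\\'
        · subst hb
          rw [findCommentA, dcont_cons]
          simp
          have h3 := (ih rest hr (i + 1)).2.2.1
          rw [h3]
        · by_cases hd : c = '"'
          · subst hd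
            rw [findCommentA, dcont_cons]
            simp
            exact (ih rest hr (i + 1)).1
          · rw [findCommentA, dcont_cons]
            simp [hb, hd]
            exact (ih rest hr (i + 1)).2.1
      · -- inside a double quote, escaped: consume one char
        have h2 := (ih rest hr (i + 1)).2.1
        rw [findCommentA]
        simpa using h2
      · -- inside a single quote
        by_cases hs : c = '\''
        · subst hs
          rw [findCommentA, scont_cons]
          simp
          exact (ih rest hr (i + 1)).1
        · rw [findCommentA, scont_cons]
          simp [hs]
          exact (ih rest hr (i + 1)).2.2.2

-- ===== VERDICT (by name: the statement is the Claim_ definition above) =====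
theorem find_comment_start_py_spec : Claim_equal_find_comment_start_py := by
  intro line _
  unfold Spec_find_comment_start_py find_comment_start_py find_comment_start_py_alt
  exact (findComment_main line.toList.length line.toList le_rfl 0).1
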